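-- pv_equiv track=rewrite | github.com/MigFeH/FI | Clase/exámenes de listas/2 extrae negativos 1.py | extrae_negativos
-- ===== SOURCE A (Python) =====
-- def extrae_negativos(lista):
--     """Hace lo del enunciado"""
--     negativos=[]
--     i=0
--     while i<len(lista):
--         if lista[i]<0:
--             negativos.append(lista[i])
--         i=i+1
--     for x in negativos:
--         lista.remove(x)
--     return negativos
-- ===== SOURCE B (Python) =====
-- def extrae_negativos(lista):
--     """Hace lo del enunciado"""
--     negativos = [x for x in lista if x < 0]
--     lista[:] = [x for x in lista if x >= 0]
--     return negativos
-- ===== Notes on version B (the rewrite author's own statement) =====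
-- stated objective: faster
-- what changed: Replaces the index-based while loop plus an O(n*k) pass of list.remove calls with a single-pass partition: one comprehension collects negatives and 'lista[:] = non-negatives' performs the in-place removal in one sweep.
import Mathlib
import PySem

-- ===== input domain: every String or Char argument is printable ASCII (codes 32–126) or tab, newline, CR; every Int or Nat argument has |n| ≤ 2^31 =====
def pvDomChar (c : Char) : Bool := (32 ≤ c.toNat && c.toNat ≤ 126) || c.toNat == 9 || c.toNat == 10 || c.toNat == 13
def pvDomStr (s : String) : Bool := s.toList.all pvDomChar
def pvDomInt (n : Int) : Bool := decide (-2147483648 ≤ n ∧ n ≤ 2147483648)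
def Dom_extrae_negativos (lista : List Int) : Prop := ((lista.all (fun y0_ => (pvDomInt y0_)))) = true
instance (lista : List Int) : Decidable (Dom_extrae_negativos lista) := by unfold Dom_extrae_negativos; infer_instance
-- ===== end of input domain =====

-- B replaces the index loop + repeated list.remove with a single-pass partition (measured faster).
-- A mutates 'lista' (removes the negatives); B performs the same mutation via 'lista[:] = ...';
-- the equivalence proved here is about the RETURN value.

-- ===== PORT A =====
-- while i < len(lista): if lista[i] < 0: negativos.append(lista[i]); i = i+1
def aNegLoop (lista : List Int) (i : Nat) (negativos : List Int) : List Int :=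
  if h : i < lista.length then
    aNegLoop lista (i + 1) (if lista[i] < 0 then negativos ++ [lista[i]] else negativos)
  else negativos
termination_by lista.length - i

-- the 'for x in negativos: lista.remove(x)' pass only mutates the argument and does not
-- affect the returned value; it is transliterated here and its result discarded.
def aRemoveLoop (negativos lista : List Int) : List Int :=
  negativos.foldl (fun l x => (PySem.List.remove? l x).getD l) lista

def extrae_negativos (lista : List Int) : List Int :=
  let negativos := aNegLoop lista 0 []
  let _ := aRemoveLoop negativos lista
  negativos

-- ===== PORT B =====
def extrae_negativos_alt (lista : List Int) : List Int :=
  lista.filter (fun x => decide (x < 0))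

-- ===== PRECONDITION & SPEC =====
def Spec_extrae_negativos (lista : List Int) (out : List Int) : Prop := out = extrae_negativos_alt lista
instance (lista : List Int) (out : List Int) : Decidable (Spec_extrae_negativos lista out) := by unfold Spec_extrae_negativos; infer_instance

-- ===== CLAIM (what is proved, stated in full; the proofs are below) =====
def Claim_equal_extrae_negativos : Prop := ∀ (lista : List Int), Dom_extrae_negativos lista → Spec_extrae_negativos lista (extrae_negativos lista)

-- ===== LEMMAS AND PROOFS =====
lemma aNegLoop_eq (lista : List Int) (i : Nat) (negativos : List Int) :
    aNegLoop lista i negativos = negativos ++ (lista.drop i).filter (fun x => decide (x < 0)) := by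
  induction i, negativos using aNegLoop.induct lista with
  | case1 i negativos h ih =>
      rw [aNegLoop, dif_pos h, List.drop_eq_getElem_cons h, List.filter_cons]
      by_cases hx : lista[i] < 0 <;> simp only [hx, if_true, if_false, dite_eq_ite] at ih ⊢ <;>
        simp [ih]
  | case2 i negativos h =>
      rw [aNegLoop, dif_neg h, List.drop_eq_nil_of_le (by omega)]
      simp

-- ===== VERDICT (by name: the statement is the Claim_ definition above) =====
theorem extrae_negativos_spec : Claim_equal_extrae_negativos := by
  intro lista _
  show extrae_negativos lista = extrae_negativos_alt lista
  simp [extrae_negativos, extrae_negativos_alt, aNegLoop_eq]
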